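-- pv_equiv track=rewrite | github.com/eappleton/cellarchitect | circuit_design/Verification.py | excise_sequence
-- ===== SOURCE A (Python) =====
-- def excise_sequence(sequence, idx_rs_sites_cassettes):
--     '''change val to be excise by None'''
--     # we don't remove them directly because it
--     # would create a conflict with indices.
--     up_seq = sequence[:]
--     for idx,_ in enumerate(up_seq):
--         if idx >= idx_rs_sites_cassettes[0] and idx < idx_rs_sites_cassettes[1]:
--             up_seq[idx] = None
--         elif idx == idx_rs_sites_cassettes[1]:
--             # turn bp site to lr OR lr to bp if reversal action
--             # pass: if an excision is within an excision, sites
--             # might already be None, thus the call will raise an error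
--             if up_seq[idx] == None:
--                 pass
--             elif 'BP' in up_seq[idx]:
--                 up_seq[idx] = up_seq[idx][:3] + '_LR_site_' + up_seq[idx][-1]
--             elif 'LR' in up_seq[idx]:
--                 up_seq[idx] = up_seq[idx][:3] + '_BP_site_' + up_seq[idx][-1]
--
--     return up_seq
-- ===== SOURCE B (Python) =====
-- def excise_sequence(sequence, idx_rs_sites_cassettes):
--     '''change val to be excised by None (bulk slice + one boundary update)'''
--     start, end = idx_rs_sites_cassettes
--     up_seq = list(sequence)
--     n = len(up_seq)
--     s = max(0, start)
--     e = min(end, n)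
--     if s < e:
--         up_seq[s:e] = [None] * (e - s)
--     if 0 <= end < n:
--         v = up_seq[end]
--         if v is not None:
--             if 'BP' in v:
--                 up_seq[end] = v[:3] + '_LR_site_' + v[-1]
--             elif 'LR' in v:
--                 up_seq[end] = v[:3] + '_BP_site_' + v[-1]
--     return up_seq
-- ===== Notes on version B (the rewrite author's own statement) =====
-- stated objective: simpler
-- what changed: Replaces the per-index scan with a branch test at every position by one bulk slice assignment of None over the clamped [start,end) range plus a single targeted conditional on the boundary element at index end.
import Mathlib
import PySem

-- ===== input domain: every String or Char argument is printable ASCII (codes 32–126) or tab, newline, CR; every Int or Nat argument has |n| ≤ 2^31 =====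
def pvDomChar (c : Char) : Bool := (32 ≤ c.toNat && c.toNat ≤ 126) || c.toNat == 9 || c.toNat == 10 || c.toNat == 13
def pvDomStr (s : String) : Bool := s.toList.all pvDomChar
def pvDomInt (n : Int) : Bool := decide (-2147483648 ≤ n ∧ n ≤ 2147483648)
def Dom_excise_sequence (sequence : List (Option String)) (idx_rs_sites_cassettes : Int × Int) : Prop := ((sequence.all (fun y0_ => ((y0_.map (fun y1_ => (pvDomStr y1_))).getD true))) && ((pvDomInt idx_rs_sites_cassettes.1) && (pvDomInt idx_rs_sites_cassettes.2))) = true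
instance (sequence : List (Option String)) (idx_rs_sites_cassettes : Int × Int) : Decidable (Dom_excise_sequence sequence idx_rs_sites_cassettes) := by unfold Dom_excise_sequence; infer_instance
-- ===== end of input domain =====

-- B replaces A's whole-list scan by a bulk slice write of the clamped range plus one
-- targeted boundary update; objective: simpler (no per-element branching loop).

-- ===== PORT A =====
-- the loop body: writes at position idx exactly as A's Python does
def pvStepA (startIdx endIdx : Int) (up : List (Option String)) (idx : Nat) : List (Option String) :=
  if (idx : Int) ≥ startIdx ∧ (idx : Int) < endIdx then
    up.set idx none
  else if (idx : Int) = endIdx then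
    match up.getD idx none with
    | none => up
    | some s =>
      if PySem.Str.isIn "BP" s then
        up.set idx (some (String.ofList (PySem.Chars.slice s.toList none (some 3) ++
          "_LR_site_".toList ++ ((PySem.List.pyGet? s.toList (-1)).map ([·])).getD [])))
      else if PySem.Str.isIn "LR" s then
        up.set idx (some (String.ofList (PySem.Chars.slice s.toList none (some 3) ++
          "_BP_site_".toList ++ ((PySem.List.pyGet? s.toList (-1)).map ([·])).getD [])))
      else up
  else up

def excise_sequence (sequence : List (Option String)) (idx_rs_sites_cassettes : Int × Int) : List (Option String) :=
  -- for idx,_ in enumerate(up_seq): each step writes only at position idx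
  (List.range sequence.length).foldl
    (pvStepA idx_rs_sites_cassettes.1 idx_rs_sites_cassettes.2) sequence

-- ===== PORT B =====
-- the None/'BP'/'LR' transform applied to the single boundary element
def pvTransformB (v : Option String) : Option String :=
  match v with
  | none => none
  | some s =>
    if PySem.Str.isIn "BP" s then
      some (String.ofList (PySem.Chars.slice s.toList none (some 3) ++
        "_LR_site_".toList ++ ((PySem.List.pyGet? s.toList (-1)).map ([·])).getD []))
    else if PySem.Str.isIn "LR" s then
      some (String.ofList (PySem.Chars.slice s.toList none (some 3) ++
        "_BP_site_".toList ++ ((PySem.List.pyGet? s.toList (-1)).map ([·])).getD []))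
    else some s

def excise_sequence_alt (sequence : List (Option String)) (idx_rs_sites_cassettes : Int × Int) : List (Option String) :=
  let startIdx := idx_rs_sites_cassettes.1
  let endIdx := idx_rs_sites_cassettes.2
  let n : Int := sequence.length
  let s := max 0 startIdx
  let e := min endIdx n
  -- up_seq[s:e] = [None] * (e - s)
  let up :=
    if s < e then
      sequence.take s.toNat ++ List.replicate (e - s).toNat none ++ sequence.drop e.toNat
    else sequence
  if 0 ≤ endIdx ∧ endIdx < n then
    up.set endIdx.toNat (pvTransformB (up.getD endIdx.toNat none))
  else up

-- ===== PRECONDITION & SPEC =====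
def Spec_excise_sequence (sequence : List (Option String)) (idx_rs_sites_cassettes : Int × Int) (out : List (Option String)) : Prop := out = excise_sequence_alt sequence idx_rs_sites_cassettes
instance (sequence : List (Option String)) (idx_rs_sites_cassettes : Int × Int) (out : List (Option String)) : Decidable (Spec_excise_sequence sequence idx_rs_sites_cassettes out) := by unfold Spec_excise_sequence; infer_instance

-- ===== CLAIM (what is proved, stated in full; the proofs are below) =====
def Claim_equal_excise_sequence : Prop := ∀ (sequence : List (Option String)) (idx_rs_sites_cassettes : Int × Int), Dom_excise_sequence sequence idx_rs_sites_cassettes → Spec_excise_sequence sequence idx_rs_sites_cassettes (excise_sequence sequence idx_rs_sites_cassettes)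

-- ===== LEMMAS AND PROOFS =====

-- the common per-index value both programs compute
def pvCell (startIdx endIdx : Int) (i : Nat) (v : Option String) : Option String :=
  if (i : Int) ≥ startIdx ∧ (i : Int) < endIdx then none
  else if (i : Int) = endIdx then pvTransformB v
  else v

-- the list after B's bulk slice assignment
def pvSliced (seq : List (Option String)) (a b : Int) : List (Option String) :=
  if max 0 a < min b (seq.length : Int) then
    seq.take (max 0 a).toNat ++
      List.replicate (min b (seq.length : Int) - max 0 a).toNat none ++
      seq.drop (min b (seq.length : Int)).toNat
  else seq

theorem pvAlt_eq (seq : List (Option String)) (a b : Int) :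
    excise_sequence_alt seq (a, b) =
      if 0 ≤ b ∧ b < (seq.length : Int) then
        (pvSliced seq a b).set b.toNat (pvTransformB ((pvSliced seq a b).getD b.toNat none))
      else pvSliced seq a b := rfl

theorem pvSliced_length (seq : List (Option String)) (a b : Int) :
    (pvSliced seq a b).length = seq.length := by
  unfold pvSliced
  split_ifs with h
  · simp only [List.length_append, List.length_take, List.length_replicate, List.length_drop]
    omega
  · rfl

theorem pvSliced_get? (seq : List (Option String)) (a b : Int) (i : Nat) :
    (pvSliced seq a b)[i]? =
      if a ≤ (i : Int) ∧ (i : Int) < b ∧ i < seq.length then some none else seq[i]? := by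
  unfold pvSliced
  by_cases h : max 0 a < min b (seq.length : Int)
  · rw [if_pos h]
    simp only [List.getElem?_append, List.getElem?_replicate, List.getElem?_take,
      List.getElem?_drop, List.length_append, List.length_take, List.length_replicate]
    split_ifs <;> first
      | rfl
      | omega
      | (congr 1; omega)
  · rw [if_neg h, if_neg (by omega)]

theorem pvB_eq_mapIdx (seq : List (Option String)) (a b : Int) :
    excise_sequence_alt seq (a, b) = seq.mapIdx (fun i v => pvCell a b i v) := by
  rw [pvAlt_eq]
  apply List.ext_getElem?
  intro i
  rw [List.getElem?_mapIdx]
  by_cases hb : 0 ≤ b ∧ b < (seq.length : Int)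
  · rw [if_pos hb, List.getElem?_set]
    by_cases hij : b.toNat = i
    · subst hij
      have hlen : b.toNat < (pvSliced seq a b).length := by
        rw [pvSliced_length]; omega
      rw [if_pos rfl, if_pos hlen]
      have hget : (pvSliced seq a b).getD b.toNat none = seq.getD b.toNat none := by
        rw [List.getD_eq_getElem?_getD, List.getD_eq_getElem?_getD, pvSliced_get?,
          if_neg (by omega)]
      have hlt : b.toNat < seq.length := by omega
      rw [hget, List.getD_eq_getElem?_getD, List.getElem?_eq_getElem hlt]
      simp only [Option.getD_some, Option.map_some]
      unfold pvCell
      rw [if_neg (by omega), if_pos (by omega)]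
    · rw [if_neg hij, pvSliced_get?]
      by_cases hin : i < seq.length
      · rw [List.getElem?_eq_getElem hin, Option.map_some]
        unfold pvCell
        by_cases hr : a ≤ (i : Int) ∧ (i : Int) < b
        · rw [if_pos (by omega), if_pos (by omega : (i : Int) ≥ a ∧ (i : Int) < b)]
        · rw [if_neg (by omega), if_neg (by omega : ¬((i : Int) ≥ a ∧ (i : Int) < b)),
            if_neg (by omega)]
      · rw [if_neg (by omega), List.getElem?_eq_none (by omega), Option.map_none]
  · rw [if_neg hb, pvSliced_get?]
    by_cases hin : i < seq.length
    · rw [List.getElem?_eq_getElem hin, Option.map_some]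
      unfold pvCell
      by_cases hr : a ≤ (i : Int) ∧ (i : Int) < b
      · rw [if_pos (by omega), if_pos (by omega : (i : Int) ≥ a ∧ (i : Int) < b)]
      · rw [if_neg (by omega), if_neg (by omega : ¬((i : Int) ≥ a ∧ (i : Int) < b)),
          if_neg (by omega)]
    · rw [if_neg (by omega), List.getElem?_eq_none (by omega), Option.map_none]

theorem pvLoopA (a b : Int) (seq : List (Option String)) (k : Nat) (hk : k ≤ seq.length) :
    (List.range k).foldl (pvStepA a b) seq
      = (seq.take k).mapIdx (fun i v => pvCell a b i v) ++ seq.drop k := by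
  induction k with
  | zero => simp
  | succ k ih =>
    rw [List.range_succ, List.foldl_append, ih (by omega)]
    simp only [List.foldl_cons, List.foldl_nil]
    have hk' : k < seq.length := by omega
    have hPlen : ((seq.take k).mapIdx (fun i v => pvCell a b i v)).length = k := by
      rw [List.length_mapIdx, List.length_take]; omega
    have hdrop : seq.drop k = seq[k] :: seq.drop (k + 1) :=
      List.drop_eq_getElem_cons hk'
    have hRHS : (seq.take (k + 1)).mapIdx (fun i v => pvCell a b i v) ++ seq.drop (k + 1)
        = (seq.take k).mapIdx (fun i v => pvCell a b i v) ++
            pvCell a b k seq[k] :: seq.drop (k + 1) := by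
      rw [List.take_add_one, List.getElem?_eq_getElem hk']
      rw [List.mapIdx_append]
      simp only [Option.toList_some, List.mapIdx_cons, List.mapIdx_nil, List.length_take,
        List.append_assoc, List.singleton_append]
      congr 2
      have hmin : 0 + min k seq.length = k := by omega
      rw [hmin]
    rw [hdrop, hRHS]
    have hget : ((seq.take k).mapIdx (fun i v => pvCell a b i v) ++
        seq[k] :: seq.drop (k + 1)).getD k none = seq[k] := by
      rw [List.getD_eq_getElem?_getD, List.getElem?_append_right hPlen.le,
        hPlen, Nat.sub_self]
      rfl
    have hset : ∀ x, ((seq.take k).mapIdx (fun i v => pvCell a b i v) ++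
        seq[k] :: seq.drop (k + 1)).set k x
        = (seq.take k).mapIdx (fun i v => pvCell a b i v) ++ x :: seq.drop (k + 1) := by
      intro x
      rw [List.set_append, if_neg (by rw [hPlen]; omega), hPlen, Nat.sub_self]
      rfl
    simp only [pvStepA]
    rw [hget]
    by_cases h1 : (k : Int) ≥ a ∧ (k : Int) < b
    · rw [if_pos h1, hset]
      have : pvCell a b k seq[k] = none := by unfold pvCell; rw [if_pos h1]
      rw [this]
    · rw [if_neg h1]
      by_cases h2 : (k : Int) = b
      · rw [if_pos h2]
        have hc : pvCell a b k seq[k] = pvTransformB seq[k] := by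
          unfold pvCell; rw [if_neg h1, if_pos h2]
        rw [hc]
        cases hsk : seq[k] with
        | none => simp [pvTransformB]
        | some s =>
          rw [hsk] at hset
          simp only [pvTransformB]
          by_cases hBP : PySem.Str.isIn "BP" s
          · rw [if_pos hBP, if_pos hBP, hset]
          · rw [if_neg hBP, if_neg hBP]
            by_cases hLR : PySem.Str.isIn "LR" s
            · rw [if_pos hLR, if_pos hLR, hset]
            · rw [if_neg hLR, if_neg hLR]
      · rw [if_neg h2]
        have hc : pvCell a b k seq[k] = seq[k] := by
          unfold pvCell; rw [if_neg h1, if_neg h2]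
        rw [hc]

theorem pvA_eq_mapIdx (seq : List (Option String)) (a b : Int) :
    excise_sequence seq (a, b) = seq.mapIdx (fun i v => pvCell a b i v) := by
  unfold excise_sequence
  rw [pvLoopA a b seq seq.length le_rfl]
  simp

-- ===== VERDICT (by name: the statement is the Claim_ definition above) =====
theorem excise_sequence_spec : Claim_equal_excise_sequence := by
  intro seq p _
  unfold Spec_excise_sequence
  obtain ⟨a, b⟩ := p
  rw [pvA_eq_mapIdx, pvB_eq_mapIdx]
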